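-- pv_equiv track=rewrite | github.com/BalmDeveloper/pcoscareagents | pcos_agents/agents/labs_agent.py | _generate_follow_up_instructions
-- ===== SOURCE A (Python) =====
-- from typing import Dict, Any, List, Optional
--
-- def _generate_follow_up_instructions(labs: List[Dict[str, Any]]) -> Dict[str, Any]:
--     """Generate instructions for follow-up based on recommended labs"""
--     instructions = {
--         "pre_test_preparation": [],
--         "timing_considerations": [],
--         "follow_up_schedule": []
--     }
--
--     # Check if any tests require fasting
--     if any('fasting' in lab.get('notes', '').lower() for lab in labs):
--         instructions["pre_test_preparation"].append(
--             "Fast for 8-12 hours before testing (water is allowed). Schedule early morning appointments when possible."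
--         )
--
--     # Check for menstrual cycle timing requirements
--     if any('menstrual cycle' in lab.get('notes', '') for lab in labs):
--         instructions["timing_considerations"].append(
--             "Schedule hormone tests (LH, FSH, estradiol) on days 3-5 of your menstrual cycle. "
--             "Progesterone should be tested on day 21 of a 28-day cycle."
--         )
--
--     # General follow-up schedule
--     instructions["follow_up_schedule"].extend([
--         "Schedule a follow-up appointment 1-2 weeks after completing lab tests to review results",
--         "Bring copies of any previous lab results for comparison"
--     ])
--
--     # Add specific instructions for abnormal results
--     instructions["follow_up_schedule"].append(
--         "If any results are abnormal, additional testing or specialist referral may be recommended"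
--     )
--
--     return instructions
-- ===== SOURCE B (Python) =====
-- def _generate_follow_up_instructions(labs):
--     """Generate instructions for follow-up based on recommended labs.
--
--     Single pass over labs: read each lab's notes once, maintaining two flags,
--     then assemble the result dict directly.
--     """
--     needs_fasting = False
--     needs_cycle_timing = False
--     for lab in labs:
--         notes = lab.get('notes', '')
--         if 'fasting' in notes.lower():
--             needs_fasting = True
--         if 'menstrual cycle' in notes:
--             needs_cycle_timing = True
--
--     return {
--         "pre_test_preparation": [
--             "Fast for 8-12 hours before testing (water is allowed). Schedule early morning appointments when possible."
--         ] if needs_fasting else [],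
--         "timing_considerations": [
--             "Schedule hormone tests (LH, FSH, estradiol) on days 3-5 of your menstrual cycle. "
--             "Progesterone should be tested on day 21 of a 28-day cycle."
--         ] if needs_cycle_timing else [],
--         "follow_up_schedule": [
--             "Schedule a follow-up appointment 1-2 weeks after completing lab tests to review results",
--             "Bring copies of any previous lab results for comparison",
--             "If any results are abnormal, additional testing or specialist referral may be recommended",
--         ],
--     }
-- ===== Notes on version B (the rewrite author's own statement) =====
-- stated objective: alternative
-- what changed: Replaces the two separate any() generator scans over labs with one loop that reads each lab's notes once and maintains two booleans, then builds the result dict in a single expression instead of mutating pre-created lists.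
import Mathlib
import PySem

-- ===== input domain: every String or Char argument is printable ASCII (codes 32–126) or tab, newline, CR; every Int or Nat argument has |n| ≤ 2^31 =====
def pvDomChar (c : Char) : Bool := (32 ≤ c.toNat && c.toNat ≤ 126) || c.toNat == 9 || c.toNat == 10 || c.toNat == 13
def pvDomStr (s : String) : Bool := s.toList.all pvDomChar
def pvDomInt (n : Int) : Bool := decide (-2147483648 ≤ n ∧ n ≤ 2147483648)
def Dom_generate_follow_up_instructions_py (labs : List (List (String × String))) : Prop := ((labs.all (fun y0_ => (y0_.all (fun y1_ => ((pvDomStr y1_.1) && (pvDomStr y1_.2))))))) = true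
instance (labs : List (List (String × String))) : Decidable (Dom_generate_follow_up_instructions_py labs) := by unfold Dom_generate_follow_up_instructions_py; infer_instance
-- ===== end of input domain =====

-- B merges A's two any() scans into a single loop over labs with two boolean flags (alternative decomposition, same cost).


-- ===== PORT A =====
-- Port of A: two separate any() scans over labs, then dict assembly with appends.
def generate_follow_up_instructions_py (labs : List (List (String × String))) : List (String × List String) :=
  let pre : List String :=
    if labs.any (fun lab => PySem.Str.isIn "fasting" (PySem.Str.lower (PySem.Dict.getD (PySem.Dict.mk lab) "notes" ""))) then
      [] ++ ["Fast for 8-12 hours before testing (water is allowed). Schedule early morning appointments when possible."]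
    else []
  let timing : List String :=
    if labs.any (fun lab => PySem.Str.isIn "menstrual cycle" (PySem.Dict.getD (PySem.Dict.mk lab) "notes" "")) then
      [] ++ ["Schedule hormone tests (LH, FSH, estradiol) on days 3-5 of your menstrual cycle. Progesterone should be tested on day 21 of a 28-day cycle."]
    else []
  let sched : List String := ([] ++ ["Schedule a follow-up appointment 1-2 weeks after completing lab tests to review results", "Bring copies of any previous lab results for comparison"]) ++ ["If any results are abnormal, additional testing or specialist referral may be recommended"]
  [("pre_test_preparation", pre), ("timing_considerations", timing), ("follow_up_schedule", sched)]

-- ===== PORT B =====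
-- B: one pass over labs maintaining two boolean flags, then build the result directly.
def pvAltLoop : List (List (String × String)) → Bool → Bool → Bool × Bool
  | [], f, c => (f, c)
  | lab :: rest, f, c =>
      let notes := PySem.Dict.getD (PySem.Dict.mk lab) "notes" ""
      pvAltLoop rest
        (if PySem.Str.isIn "fasting" (PySem.Str.lower notes) then true else f)
        (if PySem.Str.isIn "menstrual cycle" notes then true else c)

def generate_follow_up_instructions_py_alt (labs : List (List (String × String))) : List (String × List String) :=
  let flags := pvAltLoop labs false false
  [("pre_test_preparation", if flags.1 then ["Fast for 8-12 hours before testing (water is allowed). Schedule early morning appointments when possible."] else []),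
   ("timing_considerations", if flags.2 then ["Schedule hormone tests (LH, FSH, estradiol) on days 3-5 of your menstrual cycle. Progesterone should be tested on day 21 of a 28-day cycle."] else []),
   ("follow_up_schedule", ["Schedule a follow-up appointment 1-2 weeks after completing lab tests to review results", "Bring copies of any previous lab results for comparison", "If any results are abnormal, additional testing or specialist referral may be recommended"])]

-- ===== PRECONDITION & SPEC =====
def Spec_generate_follow_up_instructions_py (labs : List (List (String × String))) (out : List (String × List String)) : Prop := out = generate_follow_up_instructions_py_alt labs
instance (labs : List (List (String × String))) (out : List (String × List String)) : Decidable (Spec_generate_follow_up_instructions_py labs out) := by unfold Spec_generate_follow_up_instructions_py; infer_instance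

-- ===== CLAIM (what is proved, stated in full; the proofs are below) =====
def Claim_equal_generate_follow_up_instructions_py : Prop := ∀ (labs : List (List (String × String))), Dom_generate_follow_up_instructions_py labs → Spec_generate_follow_up_instructions_py labs (generate_follow_up_instructions_py labs)

-- ===== LEMMAS AND PROOFS =====
theorem pv_if_true_or (b f : Bool) : (if b = true then true else f) = (b || f) := by cases b <;> simp
theorem pvAltLoop_eq (labs : List (List (String × String))) (f c : Bool) :
    pvAltLoop labs f c =
      ((f || labs.any (fun lab => PySem.Str.isIn "fasting" (PySem.Str.lower (PySem.Dict.getD (PySem.Dict.mk lab) "notes" "")))),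
       (c || labs.any (fun lab => PySem.Str.isIn "menstrual cycle" (PySem.Dict.getD (PySem.Dict.mk lab) "notes" "")))) := by
  induction labs generalizing f c with
  | nil => simp [pvAltLoop]
  | cons lab rest ih =>
      simp only [pvAltLoop, ih, List.any_cons, pv_if_true_or]
      refine Prod.ext ?_ ?_ <;> simp only [Bool.or_assoc, Bool.or_comm, Bool.or_left_comm]

-- ===== VERDICT (by name: the statement is the Claim_ definition above) =====
theorem generate_follow_up_instructions_py_spec : Claim_equal_generate_follow_up_instructions_py := by
  intro labs _
  unfold Spec_generate_follow_up_instructions_py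
  simp [generate_follow_up_instructions_py, generate_follow_up_instructions_py_alt, pvAltLoop_eq]
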